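-- pv_equiv track=rewrite | github.com/degeri/dcr_matrix_rss_bot | functions.py | action_object_atom
-- ===== SOURCE A (Python) =====
-- REDDIT_ACTION_FIXES = {
--     "approved"      : "approve",
--     "banned"        : "ban",
--     "distinguished" : "distinguish",
--     "edited"        : "edit",
--     "removed"       : "remove",
--     "stickied"      : "sticky",
--     "unstickied"    : "unsticky",
--     "spam"          : "remove",
-- }
--
-- def action_object_atom(ao):
--     action = ao
--     object_ = ""
--     for wrong, fixed in REDDIT_ACTION_FIXES.items():
--         if ao.startswith(wrong + " "):
--             action = fixed
--             object_ = ao.replace(wrong + " ", "", 1)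
--             break
--
--     return action, object_
-- ===== SOURCE B (Python) =====
-- REDDIT_ACTION_FIXES = {
--     "approved"      : "approve",
--     "banned"        : "ban",
--     "distinguished" : "distinguish",
--     "edited"        : "edit",
--     "removed"       : "remove",
--     "stickied"      : "sticky",
--     "unstickied"    : "unsticky",
--     "spam"          : "remove",
-- }
--
-- def action_object_atom(ao):
--     first, sep, rest = ao.partition(" ")
--     if sep and first in REDDIT_ACTION_FIXES:
--         return REDDIT_ACTION_FIXES[first], rest
--     return ao, ""
-- ===== Notes on version B (the rewrite author's own statement) =====
-- stated objective: idiomatic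
-- what changed: The per-entry scan with startswith/replace over all eight dict items is replaced by one partition of the string at the first space followed by a single dict lookup of the leading token.
import Mathlib
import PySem

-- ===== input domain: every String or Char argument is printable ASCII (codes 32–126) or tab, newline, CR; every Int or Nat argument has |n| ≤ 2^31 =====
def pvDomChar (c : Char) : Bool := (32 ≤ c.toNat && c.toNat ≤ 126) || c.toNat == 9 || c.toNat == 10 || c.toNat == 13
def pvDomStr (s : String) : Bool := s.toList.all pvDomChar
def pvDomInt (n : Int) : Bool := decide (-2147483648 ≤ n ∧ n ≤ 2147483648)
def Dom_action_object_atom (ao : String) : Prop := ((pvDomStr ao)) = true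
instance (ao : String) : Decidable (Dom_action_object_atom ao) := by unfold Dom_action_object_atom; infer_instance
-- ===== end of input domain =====

-- B replaces A's scan over all eight dict entries by one partition at the first space plus a
-- single dict lookup of the leading token (objective: idiomatic; same return value everywhere).

-- the module-level constant REDDIT_ACTION_FIXES (a dict, as an association list in insertion order)
def pvFixes : List (String × String) :=
  [("approved", "approve"), ("banned", "ban"), ("distinguished", "distinguish"),
   ("edited", "edit"), ("removed", "remove"), ("stickied", "sticky"),
   ("unstickied", "unsticky"), ("spam", "remove")]

-- ===== PORT A =====
-- hand port of ao.replace(old, "", 1): remove the FIRST occurrence of old;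
-- exact for nonempty old (A only calls it with old = wrong + " ", never empty)
def pvReplace1 (s old : List Char) : List Char :=
  match s with
  | [] => []
  | c :: rest =>
      if old.isPrefixOf (c :: rest) then (c :: rest).drop old.length
      else c :: pvReplace1 rest old

-- A's for-loop over REDDIT_ACTION_FIXES.items() with break
def pvLoopA (ao : String) : List (String × String) → String × String
  | [] => (ao, "")
  | (wrong, fixed) :: rest =>
      if PySem.Chars.startswith ao.toList (wrong.toList ++ [' ']) then
        (fixed, String.ofList (pvReplace1 ao.toList (wrong.toList ++ [' '])))
      else pvLoopA ao rest

def action_object_atom (ao : String) : String × String := pvLoopA ao pvFixes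

-- ===== PORT B =====
-- hand port of ao.partition(" ") (single-character separator): (head, sep-found?, tail); exact
def pvPartitionSp : List Char → List Char × Bool × List Char
  | [] => ([], false, [])
  | c :: rest =>
      if c = ' ' then ([], true, rest)
      else
        let p := pvPartitionSp rest
        (c :: p.1, p.2.1, p.2.2)

def action_object_atom_alt (ao : String) : String × String :=
  let p := pvPartitionSp ao.toList
  if p.2.1 then
    match PySem.Dict.get? ⟨pvFixes⟩ (String.ofList p.1) with
    | some fixed => (fixed, String.ofList p.2.2)
    | none => (ao, "")
  else (ao, "")

-- ===== PRECONDITION & SPEC =====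
def Spec_action_object_atom (ao : String) (out : String × String) : Prop := out = action_object_atom_alt ao
instance (ao : String) (out : String × String) : Decidable (Spec_action_object_atom ao out) := by unfold Spec_action_object_atom; infer_instance

-- ===== CLAIM (what is proved, stated in full; the proofs are below) =====
def Claim_equal_action_object_atom : Prop := ∀ (ao : String), Dom_action_object_atom ao → Spec_action_object_atom ao (action_object_atom ao)

-- ===== LEMMAS AND PROOFS =====

-- pvPartitionSp is an exact decomposition of its input
theorem pvPartitionSp_true (cs : List Char) (h : (pvPartitionSp cs).2.1 = true) :
    cs = (pvPartitionSp cs).1 ++ ' ' :: (pvPartitionSp cs).2.2 ∧ ' ' ∉ (pvPartitionSp cs).1 := by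
  induction cs with
  | nil => simp [pvPartitionSp] at h
  | cons c rest ih =>
      by_cases hc : c = ' '
      · subst hc; simp [pvPartitionSp]
      · simp only [pvPartitionSp, if_neg hc] at h ⊢
        rcases ih h with ⟨h1, h2⟩
        refine ⟨by simpa using congrArg (c :: ·) h1, by simp [h2, Ne.symm hc]⟩

theorem pvPartitionSp_false (cs : List Char) (h : (pvPartitionSp cs).2.1 = false) :
    ' ' ∉ cs := by
  induction cs with
  | nil => simp
  | cons c rest ih =>
      by_cases hc : c = ' '
      · subst hc; simp [pvPartitionSp] at h
      · simp only [pvPartitionSp, if_neg hc] at h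
        simp [Ne.symm hc, ih h]

-- two space-free words followed by a space: the words coincide
theorem space_sep_inj (w f t r : List Char) (hw : ' ' ∉ w) (hf : ' ' ∉ f)
    (h : w ++ ' ' :: t = f ++ ' ' :: r) : w = f := by
  induction w generalizing f with
  | nil =>
      cases f with
      | nil => rfl
      | cons b f' =>
          simp only [List.nil_append, List.cons_append, List.cons.injEq] at h
          exact absurd (by rw [← h.1]; exact List.mem_cons_self) hf
  | cons a w' ih =>
      cases f with
      | nil =>
          simp only [List.cons_append, List.nil_append, List.cons.injEq] at h
          exact absurd (by rw [← h.1]; exact List.mem_cons_self) hw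
      | cons b f' =>
          simp only [List.cons_append, List.cons.injEq] at h
          have hw' : ' ' ∉ w' := fun m => hw (List.mem_cons_of_mem _ m)
          have hf' : ' ' ∉ f' := fun m => hf (List.mem_cons_of_mem _ m)
          rw [h.1, ih f' hw' hf' h.2]

theorem prefix_space_iff (w f r : List Char) (hw : ' ' ∉ w) (hf : ' ' ∉ f) :
    (w ++ [' ']) <+: (f ++ ' ' :: r) ↔ w = f := by
  constructor
  · rintro ⟨t, ht⟩
    have : w ++ ' ' :: t = f ++ ' ' :: r := by simpa using ht
    exact space_sep_inj w f t r hw hf this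
  · rintro rfl; exact ⟨r, by simp⟩

theorem pvReplace1_head (w r : List Char) :
    pvReplace1 (w ++ ' ' :: r) (w ++ [' ']) = r := by
  have hpre : (w ++ [' ']).isPrefixOf (w ++ ' ' :: r) = true := by
    rw [List.isPrefixOf_iff_prefix]; exact ⟨r, by simp⟩
  cases hcs : w ++ ' ' :: r with
  | nil => simp at hcs
  | cons c rest =>
      rw [hcs] at hpre
      simp only [pvReplace1, hpre, if_pos]
      rw [← hcs]
      simp

-- the loop, on an input whose first token is f: first-match lookup of f
theorem pvLoopA_sep (ao : String) (f r : List Char)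
    (hcs : ao.toList = f ++ ' ' :: r) (hf : ' ' ∉ f) :
    ∀ L : List (String × String), (∀ p ∈ L, ' ' ∉ p.1.toList) →
      pvLoopA ao L =
        match PySem.Dict.get? ⟨L⟩ (String.ofList f) with
        | some fixed => (fixed, String.ofList r)
        | none => (ao, "") := by
  intro L
  induction L with
  | nil => intro _; simp [pvLoopA, PySem.Dict.get?]
  | cons p rest ih =>
      intro hkeys
      obtain ⟨w, x⟩ := p
      have hw : ' ' ∉ w.toList := hkeys (w, x) (by simp)
      by_cases heq : w.toList = f
      · have hpre : PySem.Chars.startswith ao.toList (w.toList ++ [' ']) = true := by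
          rw [PySem.Chars.startswith_iff, hcs, heq]
          exact ⟨r, by simp⟩
        have hkey : (w == String.ofList f) = true := by
          subst heq
          simp [String.ofList_toList]
        simp only [pvLoopA, hpre, if_pos, PySem.Dict.get?, List.find?, hkey]
        rw [hcs, heq, pvReplace1_head]
        rfl
      · have hpre : PySem.Chars.startswith ao.toList (w.toList ++ [' ']) = false := by
          rw [Bool.eq_false_iff]
          intro hc
          rw [PySem.Chars.startswith_iff, hcs] at hc
          exact heq ((prefix_space_iff w.toList f r hw hf).1 hc)
        have hkey : (w == String.ofList f) = false := by
          rw [beq_eq_false_iff_ne]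
          intro hc
          exact heq (by rw [hc]; simp)
        simp only [pvLoopA, hpre, Bool.false_eq_true, if_false, PySem.Dict.get?,
          List.find?, hkey]
        exact ih (fun q hq => hkeys q (by simp [hq]))

-- no space in the input: no entry matches
theorem pvLoopA_nosep (ao : String) (hns : ' ' ∉ ao.toList) :
    ∀ L : List (String × String), pvLoopA ao L = (ao, "") := by
  intro L
  induction L with
  | nil => rfl
  | cons p rest ih =>
      obtain ⟨w, x⟩ := p
      have hpre : PySem.Chars.startswith ao.toList (w.toList ++ [' ']) = false := by
        rw [Bool.eq_false_iff]
        intro hc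
        rw [PySem.Chars.startswith_iff] at hc
        rcases hc with ⟨t, ht⟩
        apply hns
        rw [← ht]
        simp
      simp only [pvLoopA, hpre, Bool.false_eq_true, if_neg, not_false_iff]
      exact ih

theorem pvFixes_keys_nospace : ∀ p ∈ pvFixes, ' ' ∉ p.1.toList := by decide

-- ===== VERDICT (by name: the statement is the Claim_ definition above) =====
theorem action_object_atom_spec : Claim_equal_action_object_atom := by
  intro ao _
  unfold Spec_action_object_atom action_object_atom action_object_atom_alt
  cases hsep : (pvPartitionSp ao.toList).2.1 with
  | true =>
      obtain ⟨hcs, hf⟩ := pvPartitionSp_true ao.toList hsep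
      rw [pvLoopA_sep ao (pvPartitionSp ao.toList).1 (pvPartitionSp ao.toList).2.2 hcs hf
           pvFixes pvFixes_keys_nospace]
      simp [hsep]
  | false =>
      rw [pvLoopA_nosep ao (pvPartitionSp_false ao.toList hsep)]
      simp [hsep]
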